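-- pv_equiv track=rewrite | github.com/jay-dit/LAGUTOV_VKR | utils.py | del_spaces_between
-- ===== SOURCE A (Python) =====
-- def del_spaces_between(DDL):
--     l = 0
--     DDL = list(DDL)
--     for i in range(len(DDL)):
--         if DDL[i] == "'":
--             l += 1
--         if l%2 == 1 and DDL[i] == ' ':
--             DDL[i] = '_'
--     return "".join(DDL)
-- ===== SOURCE B (Python) =====
-- def del_spaces_between(DDL):
--     segs = DDL.split("'")
--     return "'".join(seg.replace(' ', '_') if i % 2 == 1 else seg
--                     for i, seg in enumerate(segs))
-- ===== Notes on version B (the rewrite author's own statement) =====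
-- stated objective: faster
-- what changed: Replaces the per-character index loop with a mutable parity counter by splitting on the quote character, rewriting spaces to underscores only in the odd-indexed (inside-quote) segments via str.replace, and rejoining with the quote.
import Mathlib
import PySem

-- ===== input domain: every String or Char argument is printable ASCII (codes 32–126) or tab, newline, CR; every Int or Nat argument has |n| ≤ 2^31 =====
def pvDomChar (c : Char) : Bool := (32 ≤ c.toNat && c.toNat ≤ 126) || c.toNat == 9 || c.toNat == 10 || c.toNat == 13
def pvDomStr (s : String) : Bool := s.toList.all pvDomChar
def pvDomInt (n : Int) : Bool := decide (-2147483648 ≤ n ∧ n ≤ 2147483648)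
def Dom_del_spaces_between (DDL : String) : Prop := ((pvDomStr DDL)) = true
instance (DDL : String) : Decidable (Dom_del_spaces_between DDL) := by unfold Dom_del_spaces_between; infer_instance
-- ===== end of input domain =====

-- B replaces A's single scan with a mutable parity counter by split-on-quote / fix odd-indexed segments / rejoin (a timing run measured B faster by a constant factor).

-- ===== PORT A =====
-- "for i in range(len(DDL)): …" reads and possibly rewrites exactly the i-th character,
-- so it is ported as a left fold over the characters carrying (l, rewritten prefix).
-- one loop iteration of A: update the counter, rewrite the character
def pvStepA (st : Int × List Char) (c : Char) : Int × List Char :=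
  let l := if c = '\'' then st.1 + 1 else st.1
  (l, st.2 ++ [if l % 2 == 1 && c == ' ' then '_' else c])

def del_spaces_between (DDL : String) : String :=
  String.ofList ((DDL.toList.foldl pvStepA (0, [])).2)

-- ===== PORT B =====
def del_spaces_between_alt (DDL : String) : String :=
  let segs := PySem.Chars.splitOn DDL.toList ['\'']
  String.ofList
    (PySem.Chars.join ['\'']
      ((PySem.List.enumerate segs).map
        (fun p => if p.1 % 2 == 1 then PySem.Chars.replace p.2 [' '] ['_'] else p.2)))

-- ===== PRECONDITION & SPEC =====
def Spec_del_spaces_between (DDL : String) (out : String) : Prop := out = del_spaces_between_alt DDL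
instance (DDL : String) (out : String) : Decidable (Spec_del_spaces_between DDL out) := by unfold Spec_del_spaces_between; infer_instance

-- ===== CLAIM (what is proved, stated in full; the proofs are below) =====
def Claim_equal_del_spaces_between : Prop := ∀ (DDL : String), Dom_del_spaces_between DDL → Spec_del_spaces_between DDL (del_spaces_between DDL)

-- ===== LEMMAS AND PROOFS =====

-- what happens to one character inside a quoted region
def pvFix (c : Char) : Char := if c = ' ' then '_' else c

-- the common reference computation: one pass with an inside/outside flag
def pvScan (inside : Bool) : List Char → List Char
  | [] => []
  | c :: rest =>
      if c = '\'' then c :: pvScan (!inside) rest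
      else (if inside && c == ' ' then '_' else c) :: pvScan inside rest

-- structural (fuel-free) version of Chars.splitOn for the single-char separator '\''
def pvSp : List Char → List Char → List (List Char)
  | [], cur => [cur.reverse]
  | c :: rest, cur => if c = '\'' then cur.reverse :: pvSp rest [] else pvSp rest (c :: cur)

theorem pvSp_ne_nil (s : List Char) : ∀ (cur : List Char), pvSp s cur ≠ [] := by
  induction s with
  | nil => intro cur; simp [pvSp]
  | cons c rest ih => intro cur; simp only [pvSp]; split <;> simp [ih]

theorem pvReplaceGo_eq (l : List Char) : ∀ (fuel : Nat) (acc : List Char), l.length ≤ fuel →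
    PySem.Chars.replace.go [' '] ['_'] fuel l acc = acc.reverse ++ l.map pvFix := by
  induction l with
  | nil => intro fuel acc _; cases fuel <;> simp [PySem.Chars.replace.go]
  | cons c rest ih =>
    intro fuel acc h
    cases fuel with
    | zero => simp at h
    | succ f =>
      by_cases hc : c = ' '
      · subst hc
        simp [PySem.Chars.replace.go, List.isPrefixOf, ih f _ (by simpa using h), pvFix]
      · simp [PySem.Chars.replace.go, List.isPrefixOf, Ne.symm hc,
          ih f _ (by simpa using h), pvFix, hc]

theorem pvReplace_eq (l : List Char) :
    PySem.Chars.replace l [' '] ['_'] = l.map pvFix := by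
  simp [PySem.Chars.replace, pvReplaceGo_eq l l.length [] le_rfl]

theorem pvSplitGo_eq (l : List Char) : ∀ (fuel : Nat) (cur : List Char) (acc : List (List Char)),
    l.length < fuel →
    PySem.Chars.splitOn.go ['\''] fuel l cur acc = acc.reverse ++ pvSp l cur := by
  induction l with
  | nil =>
    intro fuel cur acc h
    cases fuel with
    | zero => simp at h
    | succ f => simp [PySem.Chars.splitOn.go, pvSp]
  | cons c rest ih =>
    intro fuel cur acc h
    cases fuel with
    | zero => simp at h
    | succ f =>
      by_cases hc : c = '\''
      · subst hc
        simp [PySem.Chars.splitOn.go, List.isPrefixOf, ih f [] _ (by simpa using h), pvSp]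
      · simp [PySem.Chars.splitOn.go, List.isPrefixOf, Ne.symm hc, hc,
          ih f (c :: cur) acc (by simpa using h), pvSp]

theorem pvSplitOn_eq (l : List Char) :
    PySem.Chars.splitOn l ['\''] = pvSp l [] := by
  simpa using pvSplitGo_eq l (l.length + 1) [] [] (by omega)

-- alternate map over segments, flag = parity of the index
def pvAlts (b : Bool) : List (List Char) → List (List Char)
  | [] => []
  | x :: xs => (if b then x.map pvFix else x) :: pvAlts (!b) xs

theorem pvEnum_alts (segs : List (List Char)) : ∀ (n : Int), 0 ≤ n →
    (PySem.List.enumerate segs n).map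
        (fun p => if p.1 % 2 == 1 then p.2.map pvFix else p.2)
      = pvAlts (n % 2 == 1) segs := by
  induction segs with
  | nil => intro n _; simp [PySem.List.enumerate_nil, pvAlts]
  | cons x xs ih =>
    intro n hn
    have hpar : ((n + 1) % 2 == 1) = !(n % 2 == 1) := by
      rcases Int.emod_two_eq_zero_or_one n with h | h <;> simp [Int.add_emod, h]
    simp only [PySem.List.enumerate_cons, List.map_cons, ih (n + 1) (by omega), hpar]
    rfl

theorem pvJoin_cons_cons (x y : List Char) (l : List (List Char)) :
    PySem.Chars.join ['\''] (x :: y :: l)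
      = x ++ '\'' :: PySem.Chars.join ['\''] (y :: l) := by
  simp [PySem.Chars.join, List.intercalate, List.intersperse]

-- join of the alternating map over pvSp equals pvScan (`cur` = reversed pending segment)
theorem pvJoin_alts_sp (s : List Char) : ∀ (b : Bool) (cur : List Char),
    PySem.Chars.join ['\''] (pvAlts b (pvSp s cur))
      = (if b then cur.reverse.map pvFix else cur.reverse) ++ pvScan b s := by
  induction s with
  | nil =>
    intro b cur
    simp [pvSp, pvAlts, pvScan, PySem.Chars.join, List.intercalate]
  | cons c rest ih =>
    intro b cur
    by_cases hc : c = '\''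
    · subst hc
      obtain ⟨y, ys, hy⟩ := List.exists_cons_of_ne_nil (pvSp_ne_nil rest [])
      have hIH := ih (!b) []
      rw [hy] at hIH
      simp only [pvAlts, List.reverse_nil, List.map_nil, ite_self,
        List.nil_append] at hIH
      cases b <;> simp [pvSp, hy, pvAlts, pvJoin_cons_cons, pvScan] <;>
        simpa using hIH
    · have hscan : pvScan b (c :: rest)
          = (if b && c == ' ' then '_' else c) :: pvScan b rest := by
        simp [pvScan, hc]
      rw [hscan]
      simp only [pvSp, if_neg hc]
      rw [ih b (c :: cur)]
      cases b <;> by_cases hsp : c = ' ' <;> simp [hsp, pvFix]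

-- A's fold equals pvScan
theorem pvFoldA (s : List Char) : ∀ (l : Int) (acc : List Char),
    (s.foldl pvStepA (l, acc)).2 = acc ++ pvScan (l % 2 == 1) s := by
  induction s with
  | nil => intro l acc; simp [pvScan]
  | cons c rest ih =>
    intro l acc
    by_cases hc : c = '\''
    · subst hc
      have hpar : ((l + 1) % 2 == 1) = !(l % 2 == 1) := by
        rcases Int.emod_two_eq_zero_or_one l with h | h <;> simp [Int.add_emod, h]
      have hstep : pvStepA (l, acc) '\'' = (l + 1, acc ++ ['\'']) := by
        simp [pvStepA]
      rw [List.foldl_cons, hstep, ih (l + 1) (acc ++ ['\'']), hpar]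
      simp [pvScan]
    · have hstep : pvStepA (l, acc) c
          = (l, acc ++ [if l % 2 == 1 && c == ' ' then '_' else c]) := by
        simp [pvStepA, hc]
      rw [List.foldl_cons, hstep, ih l _]
      simp [pvScan, hc]

-- ===== VERDICT (by name: the statement is the Claim_ definition above) =====
theorem del_spaces_between_spec : Claim_equal_del_spaces_between := by
  intro DDL _
  unfold Spec_del_spaces_between
  have hA : del_spaces_between DDL = String.ofList (pvScan false DDL.toList) := by
    unfold del_spaces_between
    rw [pvFoldA DDL.toList 0 []]
    rfl
  have hB : del_spaces_between_alt DDL = String.ofList (pvScan false DDL.toList) := by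
    unfold del_spaces_between_alt
    have he := pvEnum_alts (pvSp DDL.toList []) 0 le_rfl
    have h0 : ((0 : Int) % 2 == 1) = false := by decide
    rw [h0] at he
    simp only [pvSplitOn_eq, pvReplace_eq, he, pvJoin_alts_sp DDL.toList false []]
    simp
  rw [hA, hB]
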